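-- pv_equiv track=rewrite | github.com/dex2000/matekate | refresh.py | determine_icon
-- ===== SOURCE A (Python) =====
-- icon_mapping = {
-- 'tourism:picnic_site': 'tourist_picnic',
-- 'tourism:theme_park': 'tourist_theme_park',
-- 'tourism:viewpoint': 'tourist_view_point',
-- 'tourism:zoo': 'tourist_zoo',
-- 'traffic_calming:yes': 'transport_speedbump',
-- }
--
-- def determine_icon(tags):
--   icon = 'vegan'
--   for kv in icon_mapping:
--     k,v = kv.split(':')
--     t = tags.get(k)
--     if not t:
--         continue
--     t = t.split(';')[0]
--     if t == v:
--       icon = icon_mapping[kv]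
--       break
--   icon = icon.replace('-', '_')
--   return icon
-- ===== SOURCE B (Python) =====
-- tourism_icons = {
--     'picnic_site': 'tourist_picnic',
--     'theme_park': 'tourist_theme_park',
--     'viewpoint': 'tourist_view_point',
--     'zoo': 'tourist_zoo',
-- }
--
-- def determine_icon(tags):
--     t = tags.get('tourism')
--     if t:
--         hit = tourism_icons.get(t.split(';')[0])
--         if hit:
--             return hit
--     t = tags.get('traffic_calming')
--     if t and t.split(';')[0] == 'yes':
--         return 'transport_speedbump'
--     return 'vegan'
-- ===== Notes on version B (the rewrite author's own statement) =====
-- stated objective: simpler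
-- what changed: B removes the loop over the flat 'key:value' mapping entirely: a straight-line early-return chain checks the 'tourism' tag against a small value->icon dict and then the 'traffic_calming' tag, with no per-entry key splitting and no trailing replace() since no icon name contains '-'.
import Mathlib
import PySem

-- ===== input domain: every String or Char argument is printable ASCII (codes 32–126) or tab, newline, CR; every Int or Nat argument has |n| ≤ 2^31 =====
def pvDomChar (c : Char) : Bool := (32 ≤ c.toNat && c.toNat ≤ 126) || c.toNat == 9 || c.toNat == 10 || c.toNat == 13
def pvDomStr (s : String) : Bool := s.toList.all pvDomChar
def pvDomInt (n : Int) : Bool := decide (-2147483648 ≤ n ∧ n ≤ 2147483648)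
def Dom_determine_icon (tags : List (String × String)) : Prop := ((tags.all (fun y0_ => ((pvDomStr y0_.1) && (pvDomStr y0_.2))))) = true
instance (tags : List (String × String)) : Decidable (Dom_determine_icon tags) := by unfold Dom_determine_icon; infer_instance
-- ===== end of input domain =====

-- B replaces the loop over the flat 'key:value' mapping by a straight-line early-return
-- chain: one lookup of 'tourism' against a value->icon dict, then 'traffic_calming' (simpler).

-- ===== PORT A =====
def iconMapping : List (String × String) :=
  [("tourism:picnic_site", "tourist_picnic"),
   ("tourism:theme_park", "tourist_theme_park"),
   ("tourism:viewpoint", "tourist_view_point"),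
   ("tourism:zoo", "tourist_zoo"),
   ("traffic_calming:yes", "transport_speedbump")]

-- the 'for kv in icon_mapping: … break' loop; 'k, v = kv.split(':')' unpacked positionally
-- (every constant key has exactly one ':', so parts has exactly two elements)
def detLoopA (tags : List (String × String)) : List (String × String) → String
  | [] => "vegan"
  | (kv, icon) :: rest =>
    let parts := ((PySem.Str.split? kv ":").getD [])
    let k := parts.headD ""
    let v := parts[1]?.getD ""
    match (PySem.Dict.mk tags).get? k with
    | none => detLoopA tags rest
    | some t =>
      if t = "" then detLoopA tags rest
      else
        if (((PySem.Str.split? t ";").getD [])).headD "" = v then icon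
        else detLoopA tags rest

def determine_icon (tags : List (String × String)) : String :=
  PySem.Str.replace (detLoopA tags iconMapping) "-" "_"

-- ===== PORT B =====
def tourismIcons : List (String × String) :=
  [("picnic_site", "tourist_picnic"),
   ("theme_park", "tourist_theme_park"),
   ("viewpoint", "tourist_view_point"),
   ("zoo", "tourist_zoo")]

-- the tail of Source B after the tourism block falls through ('t = tags.get("traffic_calming") …')
def trafficTail (tags : List (String × String)) : String :=
  match (PySem.Dict.mk tags).get? "traffic_calming" with
  | some t =>
    if t ≠ "" ∧ (((PySem.Str.split? t ";").getD [])).headD "" = "yes"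
    then "transport_speedbump" else "vegan"
  | none => "vegan"

def determine_icon_alt (tags : List (String × String)) : String :=
  match (PySem.Dict.mk tags).get? "tourism" with
  | some t =>
    if t ≠ "" then
      match (PySem.Dict.mk tourismIcons).get? ((((PySem.Str.split? t ";").getD [])).headD "") with
      | some hit => hit
      | none => trafficTail tags
    else trafficTail tags
  | none => trafficTail tags

-- ===== PRECONDITION & SPEC =====
def Spec_determine_icon (tags : List (String × String)) (out : String) : Prop := out = determine_icon_alt tags
instance (tags : List (String × String)) (out : String) : Decidable (Spec_determine_icon tags out) := by unfold Spec_determine_icon; infer_instance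

-- ===== CLAIM (what is proved, stated in full; the proofs are below) =====
def Claim_equal_determine_icon : Prop := ∀ (tags : List (String × String)), Dom_determine_icon tags → Spec_determine_icon tags (determine_icon tags)

-- ===== LEMMAS AND PROOFS =====
theorem tourism_get (s : String) :
    (PySem.Dict.mk tourismIcons).get? s =
    (if s = "picnic_site" then some "tourist_picnic" else
     if s = "theme_park" then some "tourist_theme_park" else
     if s = "viewpoint" then some "tourist_view_point" else
     if s = "zoo" then some "tourist_zoo" else none) := by
  cases h1 : ("picnic_site" == s) <;> cases h2 : ("theme_park" == s) <;>
  cases h3 : ("viewpoint" == s) <;> cases h4 : ("zoo" == s) <;>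
  simp [tourismIcons, PySem.Dict.get?, List.find?, h1, h2, h3, h4] <;> simp_all [ne_comm, beq_iff_eq]

-- replace('-','_') is the identity on every string detLoopA can return
theorem replace_id (s : String)
    (h : s = "vegan" ∨ s ∈ iconMapping.map Prod.snd) :
    PySem.Str.replace s "-" "_" = s := by
  rcases h with h | h
  · subst h; decide
  · simp [iconMapping] at h
    rcases h with h | h | h | h | h <;> subst h <;> decide

theorem loopA_eq_alt (tags : List (String × String)) :
    detLoopA tags iconMapping = determine_icon_alt tags := by
  have s1 : ((PySem.Str.split? "tourism:picnic_site" ":").getD []) = ["tourism", "picnic_site"] := by decide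
  have s2 : ((PySem.Str.split? "tourism:theme_park" ":").getD []) = ["tourism", "theme_park"] := by decide
  have s3 : ((PySem.Str.split? "tourism:viewpoint" ":").getD []) = ["tourism", "viewpoint"] := by decide
  have s4 : ((PySem.Str.split? "tourism:zoo" ":").getD []) = ["tourism", "zoo"] := by decide
  have s5 : ((PySem.Str.split? "traffic_calming:yes" ":").getD []) = ["traffic_calming", "yes"] := by decide
  simp only [detLoopA, iconMapping, determine_icon_alt, trafficTail, s1, s2, s3, s4, s5,
    List.headD, List.getElem?_cons_zero, List.getElem?_cons_succ, Option.getD_some, tourism_get]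
  cases h1 : (PySem.Dict.mk tags).get? "tourism" with
  | none =>
    cases h2 : (PySem.Dict.mk tags).get? "traffic_calming" with
    | none => simp
    | some u =>
      by_cases hu : u = ""
      · simp [hu]
      · simp only [if_neg hu, ne_eq, hu, not_false_eq_true, true_and]
        generalize (((PySem.Str.split? u ";").getD [])).headD "" = s
        split_ifs <;> simp_all
  | some t =>
    by_cases ht : t = ""
    · simp only [ht, if_pos rfl, ne_eq, not_true_eq_false, if_false]
      cases h2 : (PySem.Dict.mk tags).get? "traffic_calming" with
      | none => simp
      | some u =>
        by_cases hu : u = ""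
        · simp [hu]
        · simp only [if_neg hu, ne_eq, hu, not_false_eq_true, true_and]
          generalize (((PySem.Str.split? u ";").getD [])).headD "" = s
          split_ifs <;> simp_all
    · simp only [if_neg ht, ne_eq, ht, not_false_eq_true, if_true]
      generalize (((PySem.Str.split? t ";").getD [])).headD "" = s
      split_ifs <;> simp_all
      cases h2 : (PySem.Dict.mk tags).get? "traffic_calming" with
      | none => simp
      | some u =>
        by_cases hu : u = ""
        · simp [hu]
        · simp only [if_neg hu, ne_eq, hu, not_false_eq_true, true_and]
          generalize (((PySem.Str.split? u ";").getD [])).headD "" = s'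
          split_ifs <;> simp_all

theorem loopA_range (tags : List (String × String)) :
    detLoopA tags iconMapping = "vegan" ∨ detLoopA tags iconMapping ∈ iconMapping.map Prod.snd := by
  generalize hm : iconMapping = m
  have : ∀ l : List (String × String), (∀ p ∈ l, p ∈ m) →
      detLoopA tags l = "vegan" ∨ detLoopA tags l ∈ m.map Prod.snd := by
    intro l
    induction l with
    | nil => intro _; left; rfl
    | cons p rest ih =>
      intro hsub
      obtain ⟨kv, icon⟩ := p
      simp only [detLoopA]
      cases (PySem.Dict.mk tags).get? (((PySem.Str.split? kv ":").getD []).headD "") with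
      | none => exact ih (fun q hq => hsub q (List.mem_cons_of_mem _ hq))
      | some t =>
        dsimp only
        split_ifs with h1 h2
        · exact ih (fun q hq => hsub q (List.mem_cons_of_mem _ hq))
        · right; exact List.mem_map.mpr ⟨(kv, icon), hsub _ (List.mem_cons_self), rfl⟩
        · exact ih (fun q hq => hsub q (List.mem_cons_of_mem _ hq))
  exact this m (fun p hp => hp)

-- ===== VERDICT (by name: the statement is the Claim_ definition above) =====
theorem determine_icon_spec : Claim_equal_determine_icon := by
  intro tags _
  unfold Spec_determine_icon determine_icon
  rw [replace_id _ (loopA_range tags), loopA_eq_alt]
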